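-- pv_equiv track=rewrite | github.com/Maksattologonov/CargoTracker | cargo/accounts/utils.py | increment_alpha
-- ===== SOURCE A (Python) =====
-- def increment_alpha(s: str) -> str:
--     chars = list(s)
--     carry = 1
--     for i in range(len(chars) - 1, -1, -1):
--         if carry == 0:
--             break
--         char = chars[i]
--         new_char_ord = ord(char) + carry
--         if new_char_ord > ord('Z'):
--             chars[i] = 'A'
--             carry = 1
--         else:
--             chars[i] = chr(new_char_ord)
--             carry = 0
--
--     if carry:
--         return None
--     return ''.join(chars)
-- ===== SOURCE B (Python) =====
-- def increment_alpha(s: str) -> str: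
--     # Find i = index just past the last non-wrapping char; trailing wrap run gets 'A's.
--     i = len(s)
--     while i > 0 and ord(s[i - 1]) + 1 > ord('Z'):
--         i -= 1
--     if i == 0:
--         return None
--     return s[:i - 1] + chr(ord(s[i - 1]) + 1) + 'A' * (len(s) - i)
-- ===== Notes on version B (the rewrite author's own statement) =====
-- stated objective: alternative
-- what changed: Replaces the per-character carry loop over a mutable char list with a single scan that finds the length of the trailing wrapping run, then builds the result by slicing: prefix, plus the incremented pivot character, plus a repeated fill of the initial letter for the run.
import Mathlib
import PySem

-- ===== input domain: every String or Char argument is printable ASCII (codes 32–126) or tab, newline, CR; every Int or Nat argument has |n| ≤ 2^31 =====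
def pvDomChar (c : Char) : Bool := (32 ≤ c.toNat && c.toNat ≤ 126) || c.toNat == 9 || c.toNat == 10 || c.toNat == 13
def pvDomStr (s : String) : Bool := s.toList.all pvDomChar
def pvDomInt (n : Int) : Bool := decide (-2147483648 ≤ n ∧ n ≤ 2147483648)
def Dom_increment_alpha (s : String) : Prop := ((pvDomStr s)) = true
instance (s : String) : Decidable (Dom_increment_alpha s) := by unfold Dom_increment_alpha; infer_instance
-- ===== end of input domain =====

-- B replaces A's per-character carry loop with a single scan for the trailing wrapping run
-- followed by slice assembly (alternative decomposition, same O(n) cost).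


-- ===== PORT A =====
-- A's loop walks indices len-1 … 0, breaking once carry = 0; ported as structural
-- recursion over the reversed char list carrying the same (chars, carry) state.
def aLoop : List Char → Nat → List Char × Nat
  | rev, carry =>
    if carry = 0 then (rev, carry)                       -- 'break': rest unchanged
    else
      match rev with
      | [] => ([], carry)
      | c :: rest =>
        if c.toNat + carry > 90 then                     -- new_char_ord > ord('Z')
          let p := aLoop rest 1
          ('A' :: p.1, p.2)                              -- chars[i] = 'A'; carry = 1
        else (Char.ofNat (c.toNat + carry) :: rest, 0)   -- chars[i] = chr(...); carry = 0

def increment_alpha (s : String) : Option String :=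
  let p := aLoop s.toList.reverse 1
  if p.2 ≠ 0 then none else some (String.mk p.1.reverse)

-- ===== PORT B =====
-- Source B's while loop: decrement i while i > 0 and ord(s[i-1]) + 1 > ord('Z').
def bFindI (l : List Char) : Nat → Nat
  | 0 => 0
  | n + 1 => if (l.getD n 'A').toNat + 1 > 90 then bFindI l n else n + 1

def increment_alpha_alt (s : String) : Option String :=
  let l := s.toList
  let i := bFindI l l.length
  if i = 0 then none
  else some (String.mk (l.take (i - 1) ++ [Char.ofNat ((l.getD (i - 1) 'A').toNat + 1)]
                          ++ List.replicate (l.length - i) 'A'))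

-- ===== PRECONDITION & SPEC =====
def Spec_increment_alpha (s : String) (out : Option String) : Prop := out = increment_alpha_alt s
instance (s : String) (out : Option String) : Decidable (Spec_increment_alpha s out) := by unfold Spec_increment_alpha; infer_instance

-- ===== CLAIM (what is proved, stated in full; the proofs are below) =====
def Claim_equal_increment_alpha : Prop := ∀ (s : String), Dom_increment_alpha s → Spec_increment_alpha s (increment_alpha s)

-- ===== LEMMAS AND PROOFS =====

-- Both ports, on the reversed char list, compute this recursion.
def gRef : List Char → Option (List Char)
  | [] => none
  | c :: rest =>
    if c.toNat + 1 > 90 then (gRef rest).map (fun t => 'A' :: t)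
    else some (Char.ofNat (c.toNat + 1) :: rest)

lemma aLoop_eq_gRef (r : List Char) :
    aLoop r 1 = match gRef r with
      | none => (List.replicate r.length 'A', 1)
      | some out => (out, 0) := by
  induction r with
  | nil => simp [aLoop, gRef]
  | cons c rest ih =>
    by_cases h : c.toNat + 1 > 90
    · simp only [aLoop, gRef, if_pos h]
      cases hg : gRef rest with
      | none => simp [ih, hg, List.replicate]
      | some out => simp [ih, hg]
    · simp [aLoop, gRef, h]

def aCore (l : List Char) : Option (List Char) :=
  if (aLoop l.reverse 1).2 ≠ 0 then none else some (aLoop l.reverse 1).1.reverse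

def bCore (l : List Char) : Option (List Char) :=
  if bFindI l l.length = 0 then none
  else some (l.take (bFindI l l.length - 1)
      ++ [Char.ofNat ((l.getD (bFindI l l.length - 1) 'A').toNat + 1)]
      ++ List.replicate (l.length - bFindI l l.length) 'A')

lemma aCore_eq (l : List Char) : aCore l = (gRef l.reverse).map List.reverse := by
  unfold aCore
  rw [aLoop_eq_gRef]
  cases hg : gRef l.reverse with
  | none => simp
  | some out => simp

lemma bFindI_le (l : List Char) (n : Nat) : bFindI l n ≤ n := by
  induction n with
  | zero => simp [bFindI]
  | succ n ih => simp only [bFindI]; split <;> omega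

lemma bFindI_append (l : List Char) (c : Char) (n : Nat) (h : n ≤ l.length) :
    bFindI (l ++ [c]) n = bFindI l n := by
  induction n with
  | zero => rfl
  | succ n ih =>
    have hn : n < l.length := by omega
    simp only [bFindI, List.getD, List.getElem?_append_left hn]
    rw [ih (by omega)]
    rfl

lemma bCore_eq (l : List Char) : bCore l = (gRef l.reverse).map List.reverse := by
  induction l using List.reverseRecOn with
  | nil => rfl
  | append_singleton l c ih =>
    have hget : (l ++ [c]).getD l.length 'A' = c := by
      simp [List.getD]
    have hlen : (l ++ [c]).length = l.length + 1 := by simp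
    have hfind : bFindI (l ++ [c]) (l.length + 1)
        = if c.toNat + 1 > 90 then bFindI l l.length else l.length + 1 := by
      simp only [bFindI, hget]
      split
      · exact bFindI_append l c l.length le_rfl
      · rfl
    have hrev : (l ++ [c]).reverse = c :: l.reverse := by simp
    by_cases hw : c.toNat + 1 > 90
    · -- last char wraps
      rw [hrev]
      simp only [gRef, if_pos hw]
      cases hi : bFindI l l.length with
      | zero =>
        have : gRef l.reverse = none := by
          by_contra hne
          cases hg : gRef l.reverse with
          | none => exact hne hg
          | some out =>
            have := ih
            rw [hg] at this
            unfold bCore at this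
            rw [hi] at this
            simp at this
        unfold bCore
        rw [hlen, hfind, if_pos hw, hi, this]
        simp
      | succ k =>
        have hk : k + 1 ≤ l.length := hi ▸ bFindI_le l l.length
        -- extract the some-case of ih
        cases hg : gRef l.reverse with
        | none =>
          have := ih
          rw [hg] at this
          unfold bCore at this
          rw [hi] at this
          simp at this
        | some out =>
          have hout : out.reverse = l.take k ++ [Char.ofNat ((l.getD k 'A').toNat + 1)]
              ++ List.replicate (l.length - (k + 1)) 'A' := by
            have := ih
            rw [hg] at this
            unfold bCore at this
            rw [hi] at this
            simp only [Nat.succ_ne_zero, if_false, Nat.add_sub_cancel, Option.map_some] at this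
            exact (Option.some.injEq _ _ ▸ this).symm
          unfold bCore
          rw [hlen, hfind, if_pos hw, hi]
          have hk' : k < l.length := by omega
          have htake : (l ++ [c]).take (k + 1 - 1) = l.take k := by
            have h1 : k + 1 - 1 = k := rfl
            rw [h1, List.take_append_of_le_length (by omega)]
          have hget2 : (l ++ [c]).getD (k + 1 - 1) 'A' = l.getD k 'A' := by
            simp [List.getD, List.getElem?_append_left hk']
          simp only [Nat.succ_ne_zero, if_false, htake, hget2, Option.map_some]
          have hrep : l.length + 1 - (k + 1) = (l.length - (k + 1)) + 1 := by omega
          rw [hrep, List.replicate_succ', List.reverse_cons, hout]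
          simp
    · -- last char does not wrap: result is l ++ [inc c]
      unfold bCore
      rw [hlen, hfind, if_neg hw, hrev]
      simp [gRef, hw]

lemma core_eq (l : List Char) : aCore l = bCore l := by
  rw [aCore_eq, bCore_eq]

-- ===== VERDICT (by name: the statement is the Claim_ definition above) =====
theorem increment_alpha_spec : Claim_equal_increment_alpha := by
  intro s _
  unfold Spec_increment_alpha increment_alpha increment_alpha_alt
  have h := core_eq s.toList
  unfold aCore bCore at h
  split_ifs at h with h1 h2 h2 <;> simp_all
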